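-- pv_equiv track=rewrite | github.com/afaucon/obs-postprocessing | main.py | get_periods_to_keep
-- ===== SOURCE A (Python) =====
-- def get_periods_to_keep(dusting_rules):
--     periods_to_keep = []
--     a_sequence_is_ongoing = False
--     for rule in dusting_rules:
--         if rule['value'].lower() == 'cut':
--             if a_sequence_is_ongoing:
--                 periods_to_keep[-1].append(rule['timestamp'])
--                 a_sequence_is_ongoing = False
--         else:
--             if not a_sequence_is_ongoing:
--                 periods_to_keep.append([rule['timestamp']])
--                 a_sequence_is_ongoing = True
--     return periods_to_keep
-- ===== SOURCE B (Python) =====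
-- def get_periods_to_keep(dusting_rules):
--     def is_cut(rule):
--         return rule['value'].lower() == 'cut'
--
--     periods = []
--     i, n = 0, len(dusting_rules)
--     while i < n:
--         # act on the first rule of each run of same-category rules
--         rule = dusting_rules[i]
--         cat = is_cut(rule)
--         if cat:
--             if periods and len(periods[-1]) == 1:
--                 periods[-1].append(rule['timestamp'])
--         else:
--             periods.append([rule['timestamp']])
--         # skip the rest of this run
--         i += 1
--         while i < n and is_cut(dusting_rules[i]) == cat:
--             i += 1
--     return periods
-- ===== Notes on version B (the rewrite author's own statement) =====
-- stated objective: alternative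
-- what changed: B iterates over runs of same-category rules (acting only on the first rule of each run and skipping the rest), replacing A's per-element a_sequence_is_ongoing flag by the observable condition 'the last period is still open (length 1)'.
import Mathlib
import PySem

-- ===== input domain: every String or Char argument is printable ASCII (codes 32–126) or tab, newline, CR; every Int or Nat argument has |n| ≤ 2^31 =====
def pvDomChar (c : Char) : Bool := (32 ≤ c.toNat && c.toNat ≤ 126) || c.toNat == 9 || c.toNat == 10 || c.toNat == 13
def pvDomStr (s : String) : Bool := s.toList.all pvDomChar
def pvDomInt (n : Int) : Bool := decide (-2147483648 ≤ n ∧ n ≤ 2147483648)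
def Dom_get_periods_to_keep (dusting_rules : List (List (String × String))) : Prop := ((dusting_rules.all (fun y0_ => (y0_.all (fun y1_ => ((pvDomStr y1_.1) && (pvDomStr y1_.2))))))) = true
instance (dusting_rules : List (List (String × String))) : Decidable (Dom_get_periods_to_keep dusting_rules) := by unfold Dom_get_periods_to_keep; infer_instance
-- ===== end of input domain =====

-- B rewrites A's per-element flag loop as a loop over runs of same-category rules,
-- acting only on the first rule of each run; objective: alternative decomposition (same cost).

-- shared primitives: rule[k] (first-match association-list lookup), rule['value'].lower() == 'cut',
-- rule['timestamp'], and periods[-1].append(t) (mutate the last inner list)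
def pvGet? (rule : List (String × String)) (k : String) : Option String :=
  (rule.find? (·.1 == k)).map (·.2)

def pvIsCut (rule : List (String × String)) : Bool :=
  PySem.Str.lower ((pvGet? rule "value").getD "") == "cut"

def pvTs (rule : List (String × String)) : String :=
  (pvGet? rule "timestamp").getD ""

def pvAppendLast (ps : List (List String)) (t : String) : List (List String) :=
  match ps with
  | [] => []
  | [p] => [p ++ [t]]
  | p :: q :: rest => p :: pvAppendLast (q :: rest) t

-- ===== PORT A =====
-- A's loop body: state = (periods_to_keep, a_sequence_is_ongoing)
def pvAStep (st : List (List String) × Bool) (rule : List (String × String)) :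
    List (List String) × Bool :=
  if pvIsCut rule then
    if st.2 then (pvAppendLast st.1 (pvTs rule), false) else st
  else
    if st.2 then st else (st.1 ++ [[pvTs rule]], true)

def get_periods_to_keep (dusting_rules : List (List (String × String))) : List (List String) :=
  (dusting_rules.foldl pvAStep ([], false)).1

-- ===== PORT B =====
-- B's test 'periods and len(periods[-1]) == 1'
def pvIsOpen (ps : List (List String)) : Bool :=
  match ps.getLast? with
  | some p => p.length == 1
  | none => false

-- B's outer while loop; the inner skip-the-run while loop is the dropWhile
def pvBGo (periods : List (List String)) (rules : List (List (String × String))) :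
    List (List String) :=
  match rules with
  | [] => periods
  | rule :: rest =>
    let c := pvIsCut rule
    let periods' :=
      if c then
        if pvIsOpen periods then pvAppendLast periods (pvTs rule) else periods
      else periods ++ [[pvTs rule]]
    pvBGo periods' (rest.dropWhile (fun r' => pvIsCut r' == c))
termination_by rules.length
decreasing_by
  exact Nat.lt_succ_of_le (List.length_dropWhile_le _ _)

def get_periods_to_keep_alt (dusting_rules : List (List (String × String))) : List (List String) :=
  pvBGo [] dusting_rules

-- ===== PRECONDITION & SPEC =====
-- whether A reads rule['timestamp']: it does exactly on the first rule of the list when it is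
-- not a cut, and on every rule whose category (cut / non-cut) differs from its predecessor's
def pvReadsTs (prev : Option (List (String × String))) (rule : List (String × String)) : Bool :=
  match prev with
  | none => !pvIsCut rule
  | some p => pvIsCut p != pvIsCut rule

-- Pre_ excludes exactly the inputs on which A raises KeyError: a rule without a 'value' key,
-- or a rule without a 'timestamp' key in a position where the loop reads the timestamp
def Pre_get_periods_to_keep (dusting_rules : List (List (String × String))) : Prop :=
  (∀ rule ∈ dusting_rules, (pvGet? rule "value").isSome) ∧
  (∀ pr ∈ List.zip ((none : Option (List (String × String))) :: dusting_rules.map some)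
      dusting_rules, pvReadsTs pr.1 pr.2 → (pvGet? pr.2 "timestamp").isSome)

instance (dusting_rules : List (List (String × String))) : Decidable (Pre_get_periods_to_keep dusting_rules) := by unfold Pre_get_periods_to_keep; infer_instance

def pvWitness_get_periods_to_keep : (List (List (String × String))) :=
  [[("value", "keep"), ("timestamp", "0:01")], [("value", "Cut"), ("timestamp", "0:05")]]

def Spec_get_periods_to_keep (dusting_rules : List (List (String × String))) (out : List (List String)) : Prop := out = get_periods_to_keep_alt dusting_rules
instance (dusting_rules : List (List (String × String))) (out : List (List String)) : Decidable (Spec_get_periods_to_keep dusting_rules out) := by unfold Spec_get_periods_to_keep; infer_instance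

-- ===== CLAIM (what is proved, stated in full; the proofs are below) =====
def Claim_equal_get_periods_to_keep : Prop := ∀ (dusting_rules : List (List (String × String))), Dom_get_periods_to_keep dusting_rules → Pre_get_periods_to_keep dusting_rules → Spec_get_periods_to_keep dusting_rules (get_periods_to_keep dusting_rules)

-- ===== LEMMAS AND PROOFS =====

-- opening a period makes the last period open
theorem pvIsOpen_concat (ps : List (List String)) (t : String) :
    pvIsOpen (ps ++ [[t]]) = true := by
  simp [pvIsOpen]

-- closing the last period: pvAppendLast maps getLast? through (· ++ [t])
theorem pvAppendLast_getLast? (ps : List (List String)) (t : String) :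
    (pvAppendLast ps t).getLast? = ps.getLast?.map (· ++ [t]) := by
  induction ps with
  | nil => simp [pvAppendLast]
  | cons p rest ih =>
    cases rest with
    | nil => simp [pvAppendLast]
    | cons q rest' =>
      obtain ⟨y, ys, hy⟩ : ∃ y ys, pvAppendLast (q :: rest') t = y :: ys := by
        cases rest' <;> exact ⟨_, _, rfl⟩
      show (p :: pvAppendLast (q :: rest') t).getLast? = _
      rw [hy, List.getLast?_cons_cons, ← hy, ih, List.getLast?_cons_cons]

theorem pvIsOpen_appendLast (ps : List (List String)) (t : String)
    (h : pvIsOpen ps = true) : pvIsOpen (pvAppendLast ps t) = false := by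
  unfold pvIsOpen at *
  rw [pvAppendLast_getLast?]
  cases hl : ps.getLast? with
  | none => simp
  | some p =>
    rw [hl] at h
    simp only [Option.map_some]
    simp only [beq_iff_eq] at h ⊢
    simp [h]

-- A's steps on the tail of a run are no-ops: the flag already equals !cat
theorem pvNoop_run (c : Bool) (st : List (List String) × Bool) (h2 : st.2 = !c) :
    ∀ rs : List (List (String × String)), (∀ r ∈ rs, pvIsCut r = c) →
      List.foldl pvAStep st rs = st := by
  intro rs
  induction rs with
  | nil => intro _; rfl
  | cons r rest ih =>
    intro hall
    have hc : pvIsCut r = c := hall r (by simp)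
    have hstep : pvAStep st r = st := by
      unfold pvAStep
      cases c with
      | true => simp [hc, h2]
      | false => simp [hc, h2]
    rw [List.foldl_cons, hstep]
    exact ih (fun r hr => hall r (by simp [hr]))

-- main invariant lemma: starting from a state whose flag equals pvIsOpen of the periods,
-- and whose flag is false if the next rule is not a cut, A's fold equals B's run loop
theorem pvMain (n : ℕ) : ∀ (rs : List (List (String × String))), rs.length ≤ n →
    ∀ (periods : List (List String)) (flag : Bool),
      flag = pvIsOpen periods →
      (∀ r, rs.head? = some r → pvIsCut r = false → flag = false) →
      (List.foldl pvAStep (periods, flag) rs).1 = pvBGo periods rs := by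
  induction n with
  | zero =>
    intro rs hlen periods flag _ _
    have : rs = [] := List.length_eq_zero_iff.mp (Nat.le_zero.mp hlen)
    subst this
    simp [pvBGo]
  | succ n ih =>
    intro rs hlen periods flag hinv hhead
    cases rs with
    | nil => simp [pvBGo]
    | cons rule rest =>
      -- A's first step lands on (periods', !cat) where periods' is B's step, and the
      -- invariant is restored
      obtain ⟨periods', hstep, hinv', hB⟩ :
          ∃ ps', pvAStep (periods, flag) rule = (ps', !pvIsCut rule)
            ∧ (!pvIsCut rule) = pvIsOpen ps'
            ∧ pvBGo periods (rule :: rest)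
                = pvBGo ps' (rest.dropWhile (fun r' => pvIsCut r' == pvIsCut rule)) := by
        cases hcv : pvIsCut rule with
        | true =>
          cases ho : pvIsOpen periods with
          | true =>
            refine ⟨pvAppendLast periods (pvTs rule), ?_, ?_, ?_⟩
            · unfold pvAStep; simp [hcv, hinv, ho]
            · simp [pvIsOpen_appendLast periods (pvTs rule) ho]
            · rw [pvBGo]; simp [hcv, ho]
          | false =>
            refine ⟨periods, ?_, ?_, ?_⟩
            · unfold pvAStep; simp [hcv, hinv, ho]
            · simp [ho]
            · rw [pvBGo]; simp [hcv, ho]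
        | false =>
          have hf : flag = false := hhead rule rfl hcv
          refine ⟨periods ++ [[pvTs rule]], ?_, ?_, ?_⟩
          · unfold pvAStep; simp [hcv, hf]
          · simp [pvIsOpen_concat]
          · rw [pvBGo]; simp [hcv]
      have hrun : ∀ r ∈ rest.takeWhile (fun r' => pvIsCut r' == pvIsCut rule),
          pvIsCut r = pvIsCut rule := by
        intro r hr
        simpa using List.mem_takeWhile_imp hr
      have hdroplen : (rest.dropWhile (fun r' => pvIsCut r' == pvIsCut rule)).length ≤ n := by
        have h1 := List.length_dropWhile_le (fun r' => pvIsCut r' == pvIsCut rule) rest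
        simp at hlen
        omega
      have hhead' : ∀ r, (rest.dropWhile (fun r' => pvIsCut r' == pvIsCut rule)).head? = some r →
          pvIsCut r = false → (!pvIsCut rule) = false := by
        intro r hr hcut
        have hne := List.head?_dropWhile_not (p := fun r' => pvIsCut r' == pvIsCut rule) (l := rest)
        rw [hr] at hne
        simp only [hcut] at hne
        simp at hne
        simp [hne]
      calc (List.foldl pvAStep (periods, flag) (rule :: rest)).1
          = (List.foldl pvAStep (periods', !pvIsCut rule) rest).1 := by
            rw [List.foldl_cons, hstep]
        _ = (List.foldl pvAStep (periods', !pvIsCut rule)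
              (rest.dropWhile (fun r' => pvIsCut r' == pvIsCut rule))).1 := by
            conv_lhs => rw [← List.takeWhile_append_dropWhile
              (p := fun r' => pvIsCut r' == pvIsCut rule) (l := rest)]
            rw [List.foldl_append,
              pvNoop_run (pvIsCut rule) (periods', !pvIsCut rule) rfl _ hrun]
        _ = pvBGo periods' (rest.dropWhile (fun r' => pvIsCut r' == pvIsCut rule)) :=
            ih _ hdroplen periods' (!pvIsCut rule) hinv' hhead'
        _ = pvBGo periods (rule :: rest) := hB.symm

-- ===== VERDICT (by name: the statement is the Claim_ definition above) =====
theorem get_periods_to_keep_spec : Claim_equal_get_periods_to_keep := by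
  intro rules _ _
  unfold Spec_get_periods_to_keep get_periods_to_keep get_periods_to_keep_alt
  exact pvMain rules.length rules le_rfl [] false rfl (fun _ _ _ => rfl)
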